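-- pv_equiv track=rewrite | github.com/b3lla-c0rtez/Bella-s-Projects | CS Classes at UO/CS 210/Final Exam Notes/foo.py | foo
-- ===== SOURCE A (Python) =====
-- def foo(astr):
--     myD = {}
--
--     for ch in astr:
--         if ch in myD:
--             myD[ch] += 1
--         else:
--             myD[ch] = 1
--
--     valL = myD.values()
--     ct = min(valL)
--
--     myS = []
--
--     for item in myD:
--         if myD[item] == ct:
--             myS.append(item)
--
--     return myS
-- ===== SOURCE B (Python) =====
-- def foo(astr):
--     counts = {}
--     for ch in astr:
--         counts[ch] = counts.get(ch, 0) + 1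
--     buckets = {}
--     for ch, c in counts.items():
--         buckets.setdefault(c, []).append(ch)
--     return buckets[min(buckets)]
-- ===== Notes on version B (the rewrite author's own statement) =====
-- stated objective: alternative
-- what changed: B inverts the char->count table into count->chars buckets and returns the bucket at the minimum count key, instead of A's min over values followed by a re-filtering pass over the dict keys.
-- outside the precondition, e.g. on foo(''): A raises ValueError, B raises ValueError
import Mathlib
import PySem

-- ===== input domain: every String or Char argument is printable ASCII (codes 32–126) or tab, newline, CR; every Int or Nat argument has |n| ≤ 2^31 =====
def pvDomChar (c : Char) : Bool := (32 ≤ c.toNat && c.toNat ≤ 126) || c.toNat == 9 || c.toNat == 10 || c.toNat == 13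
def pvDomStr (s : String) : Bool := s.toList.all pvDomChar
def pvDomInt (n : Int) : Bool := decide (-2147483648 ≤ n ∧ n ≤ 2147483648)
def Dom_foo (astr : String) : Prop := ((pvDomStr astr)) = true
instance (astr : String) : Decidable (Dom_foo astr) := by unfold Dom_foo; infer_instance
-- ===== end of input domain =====

-- B replaces A's "find min of counts, then re-filter the dict" by inverting the count table into
-- count→chars buckets and indexing the minimum key (objective: alternative decomposition, same cost).

-- ===== PORT A =====
-- literal transliteration of Source A: count loop with a contains test, min over values, filter loop over keys
def foo (astr : String) : List String :=
  let myD : PySem.Dict Char Int :=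
    astr.toList.foldl
      (fun d ch => if d.contains ch then d.modify ch 0 (· + 1) else d.insert ch 1)
      PySem.Dict.empty
  match PySem.List.min? myD.values (fun v => v) with     -- min(valL); none = ValueError, excluded by Pre_
  | none => []
  | some ct =>
      myD.keys.foldl
        (fun myS item => if myD.getD item 0 == ct then myS ++ [String.ofList [item]] else myS)
        []

-- ===== PORT B =====
-- literal transliteration of Source B: counts via get-default insert, buckets keyed by count, index min key
-- (buckets[min(buckets)] is ported as getD at the min key: that key is by construction present)
def foo_alt (astr : String) : List String :=
  let counts : PySem.Dict Char Int :=
    astr.toList.foldl (fun d ch => d.insert ch (d.getD ch 0 + 1)) PySem.Dict.empty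
  let buckets : PySem.Dict Int (List Char) :=
    counts.items.foldl (fun b p => b.modify p.2 [] (· ++ [p.1])) PySem.Dict.empty
  match PySem.List.min? buckets.keys (fun v => v) with   -- min(buckets); none = ValueError, excluded by Pre_
  | none => []
  | some m => (buckets.getD m []).map (fun ch => String.ofList [ch])

-- ===== PRECONDITION & SPEC =====
-- Pre_ excludes only the empty string, on which both A and B raise ValueError (min of an empty sequence).
def Pre_foo (astr : String) : Prop := astr ≠ ""
instance (astr : String) : Decidable (Pre_foo astr) := by unfold Pre_foo; infer_instance
def pvWitness_foo : String := "ab"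
def Spec_foo (astr : String) (out : List String) : Prop := out = foo_alt astr
instance (astr : String) (out : List String) : Decidable (Spec_foo astr out) := by unfold Spec_foo; infer_instance

-- ===== CLAIM (what is proved, stated in full; the proofs are below) =====
def Claim_equal_foo : Prop := ∀ (astr : String), Dom_foo astr → Pre_foo astr → Spec_foo astr (foo astr)

-- ===== LEMMAS AND PROOFS =====

-- A's counting step (contains-test then modify/insert) is exactly Counter's step.
lemma foo_count_step (d : PySem.Dict Char Int) (ch : Char) :
    (if d.contains ch then d.modify ch 0 (· + 1) else d.insert ch 1) = d.modify ch 0 (· + 1) := by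
  by_cases h : d.contains ch = true
  · simp [h]
  · simp only [Bool.not_eq_true] at h
    simp [h, PySem.Dict.modify, PySem.Dict.getD_of_not_contains d 0 h]

-- both counting loops build Counter(astr)
lemma foo_dictA (l : List Char) :
    l.foldl (fun d ch => if d.contains ch then d.modify ch 0 (· + 1) else d.insert ch 1)
      PySem.Dict.empty = PySem.Dict.counter l := by
  rw [PySem.Dict.counter_eq_foldl]
  congr 1
  funext d ch
  exact foo_count_step d ch

-- min? with the identity key returns THE minimum, so it only depends on the members
lemma min?_id_eq_of_mem_of_isMin {xs : List Int} {m : Int}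
    (hmem : m ∈ xs) (hmin : ∀ y ∈ xs, m ≤ y) :
    PySem.List.min? xs (fun v => v) = some m := by
  cases hx : PySem.List.min? xs (fun v => v) with
  | none => rw [PySem.List.min?_eq_none_iff] at hx; simp [hx] at hmem
  | some m' =>
      have h1 := PySem.List.min?_isMin hx m hmem
      have h2 := hmin m' (PySem.List.min?_mem hx)
      simp at h1
      exact congrArg some (le_antisymm h1 h2)

-- the two min's agree: min over values vs min over the (deduplicated) bucket keys
lemma foo_min_eq (vals : List Int) {ct : Int}
    (h : PySem.List.min? vals (fun v => v) = some ct) :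
    PySem.List.min? (PySem.Set.ofList vals) (fun v => v) = some ct := by
  apply min?_id_eq_of_mem_of_isMin
  · exact (PySem.Set.mem_ofList _ _).mpr (PySem.List.min?_mem h)
  · intro y hy
    exact PySem.List.min?_isMin h y ((PySem.Set.mem_ofList _ _).mp hy)

-- B's bucket at count c holds exactly the keys of counts whose count is c, in key order
lemma foo_bucket (items : List (Char × Int)) (c : Int) :
    (items.foldl (fun b p => b.modify p.2 [] (· ++ [p.1])) PySem.Dict.empty).getD c []
      = ((items.filter (fun p => p.2 == c)).map (fun p => p.1)) := by
  have hmap : items.foldl (fun b p => b.modify p.2 [] (· ++ [p.1])) PySem.Dict.empty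
      = (items.map Prod.swap).foldl (fun b q => b.modify q.1 [] (· ++ [q.2])) PySem.Dict.empty := by
    rw [List.foldl_map]; rfl
  rw [hmap, PySem.Dict.getD_foldl_modify_append]
  simp [List.filter_map, List.map_map, Function.comp_def, Prod.swap]

lemma foo_buckets_keys (items : List (Char × Int)) :
    (items.foldl (fun b p => b.modify p.2 [] (· ++ [p.1])) PySem.Dict.empty).keys
      = PySem.Set.ofList (items.map (fun p => p.2)) := by
  rw [PySem.Dict.keys_foldl_modify_key items (fun p => p.2) [] (fun _ p => (· ++ [p.1]))]
  simp [PySem.Dict.keys_empty, PySem.Set.update_nil_left]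

-- the main equivalence on the character list
lemma foo_eq_alt (astr : String) (hne : astr.toList ≠ []) : foo astr = foo_alt astr := by
  unfold foo foo_alt
  rw [foo_dictA, PySem.Dict.foldl_insert_getD_add_one_eq_counter]
  dsimp only
  set l := astr.toList with hl
  -- values of counter l are nonempty
  have hvals : (PySem.Dict.counter l).values = (PySem.Set.ofList l).map (fun k => (l.count k : Int)) := by
    simp [PySem.Dict.values, PySem.Dict.items_counter, List.map_map, Function.comp_def]
  have hvne : (PySem.Dict.counter l).values ≠ [] := by
    obtain ⟨a, t, hlat⟩ := List.exists_cons_of_ne_nil hne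
    rw [hvals, hlat]
    simp [PySem.Set.ofList_cons]
  cases hct : PySem.List.min? (PySem.Dict.counter l).values (fun v => v) with
  | none => exact absurd ((PySem.List.min?_eq_none_iff _ _).mp hct) hvne
  | some ct =>
      -- B's min key equals ct
      have hkeys : (((PySem.Dict.counter l).items.foldl
            (fun b p => b.modify p.2 [] (· ++ [p.1])) PySem.Dict.empty)).keys
          = PySem.Set.ofList (PySem.Dict.counter l).values := by
        rw [foo_buckets_keys]; rfl
      have hminB : PySem.List.min? (PySem.Set.ofList (PySem.Dict.counter l).values) (fun v => v)
          = some ct := foo_min_eq _ hct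
      simp only [hkeys, hminB]
      -- both sides: the min-count keys in key order, mapped to singleton strings
      rw [foo_bucket, PySem.List.foldl_append_if (fun item => (PySem.Dict.counter l).getD item 0 == ct)
            (fun item => String.ofList [item])]
      rw [PySem.Dict.items_counter]
      simp [List.filter_map, List.map_map, Function.comp_def, PySem.Dict.keys_counter,
            PySem.Dict.getD_counter]

-- ===== VERDICT (by name: the statement is the Claim_ definition above) =====
theorem foo_spec : Claim_equal_foo := by
  intro astr _ hpre
  unfold Spec_foo
  apply foo_eq_alt
  intro h
  exact hpre (String.toList_eq_nil_iff.mp h)
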